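-- pv_equiv track=rewrite | github.com/MrChepe09/Competitive-Programming-Codes | Practice Codes/COMPILER.py | compiler
-- ===== SOURCE A (Python) =====
-- def compiler(s):
--     ans = 0
--     t = 0
--     for i in range(len(s)):
--         if(s[i]=='<'):
--             t+=1
--         else:
--             t-=1
--             if(t==0):
--                 ans = max(ans, i+1)
--             elif(t<0):
--                 break
--     return ans
-- ===== SOURCE B (Python) =====
-- from itertools import accumulate
--
-- def compiler(s):
--     bal = list(accumulate((1 if c == '<' else -1) for c in s))
--     cutoff = next((i for i, b in enumerate(bal) if b < 0), len(s))
--     return max((i + 1 for i in range(cutoff) if bal[i] == 0), default=0)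
-- ===== Notes on version B (the rewrite author's own statement) =====
-- stated objective: alternative
-- what changed: A's single interleaved scan with break is replaced by a build-table-then-scan decomposition: build the running-balance list, find the cutoff before the first negative balance, then take the largest i+1 with balance 0 before the cutoff.
import Mathlib
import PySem

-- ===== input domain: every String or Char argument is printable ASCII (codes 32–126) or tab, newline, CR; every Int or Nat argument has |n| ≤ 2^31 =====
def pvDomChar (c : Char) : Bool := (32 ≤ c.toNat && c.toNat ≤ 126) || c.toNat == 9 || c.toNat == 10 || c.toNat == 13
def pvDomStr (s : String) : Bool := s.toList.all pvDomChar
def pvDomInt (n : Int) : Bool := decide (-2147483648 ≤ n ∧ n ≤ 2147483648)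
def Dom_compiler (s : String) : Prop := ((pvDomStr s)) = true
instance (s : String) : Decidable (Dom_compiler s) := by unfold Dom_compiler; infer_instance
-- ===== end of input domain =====

-- B replaces A's single interleaved scan-with-break by a build-balance-table-then-scan
-- decomposition (objective: alternative; same linear cost).

-- ===== PORT A =====
-- A's for-loop over indices, carrying (ans, t); the `break` returns ans immediately.
def compilerLoop : List Char → Int → Int → Int → Int
  | [], _, ans, _ => ans
  | c :: rest, i, ans, t =>
    if c = '<' then compilerLoop rest (i + 1) ans (t + 1)
    else
      if t - 1 = 0 then compilerLoop rest (i + 1) (max ans (i + 1)) (t - 1)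
      else if t - 1 < 0 then ans
      else compilerLoop rest (i + 1) ans (t - 1)

def compiler (s : String) : Int := compilerLoop s.toList 0 0 0

-- ===== PORT B =====
-- itertools.accumulate: inclusive running sums starting from acc.
def pvAccum : List Int → Int → List Int
  | [], _ => []
  | d :: rest, acc => (acc + d) :: pvAccum rest (acc + d)

def compiler_alt (s : String) : Int :=
  let bal := pvAccum (s.toList.map (fun c => if c = '<' then (1 : Int) else -1)) 0
  let cutoff := bal.findIdx (fun b => b < 0)
  ((List.range cutoff).filter (fun i => bal.getD i 0 = 0)).foldl
    (fun (a : Int) (i : Nat) => max a ((i : Int) + 1)) 0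

-- ===== PRECONDITION & SPEC =====
def Spec_compiler (s : String) (out : Int) : Prop := out = compiler_alt s
instance (s : String) (out : Int) : Decidable (Spec_compiler s out) := by unfold Spec_compiler; infer_instance

-- ===== CLAIM (what is proved, stated in full; the proofs are below) =====
def Claim_equal_compiler : Prop := ∀ (s : String), Dom_compiler s → Spec_compiler s (compiler s)

-- ===== LEMMAS AND PROOFS =====

-- common intermediate form: walk the balance list, stop before the first negative,
-- record i+1 at each zero
def scanZeros : List Int → Int → Int → Int
  | [], _, ans => ans
  | h :: rest, i, ans =>
    if h < 0 then ans
    else if h = 0 then scanZeros rest (i + 1) (max ans (i + 1))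
    else scanZeros rest (i + 1) ans

theorem loopA_eq_scanZeros (l : List Char) (i ans t : Int) (ht : 0 ≤ t) :
    compilerLoop l i ans t =
      scanZeros (pvAccum (l.map (fun c => if c = '<' then (1 : Int) else -1)) t) i ans := by
  induction l generalizing i ans t with
  | nil => simp [compilerLoop, pvAccum, scanZeros]
  | cons c rest ih =>
    simp only [compilerLoop, List.map, pvAccum, scanZeros]
    by_cases hc : c = '<'
    · simp only [if_pos hc]
      rw [if_neg (by omega : ¬ t + 1 < 0), if_neg (by omega : ¬ t + 1 = 0),
        ih _ _ _ (by omega)]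
    · simp only [if_neg hc]
      rw [show t + -1 = t - 1 from by ring]
      by_cases h0 : t - 1 = 0
      · rw [if_pos h0, if_neg (by omega : ¬ t - 1 < 0), if_pos h0, ih _ _ _ (by omega)]
      · by_cases hneg : t - 1 < 0
        · rw [if_neg h0, if_pos hneg, if_pos hneg]
        · rw [if_neg h0, if_neg hneg, if_neg hneg, if_neg h0, ih _ _ _ (by omega)]

theorem scanB_eq_scanZeros (bal : List Int) (i ans : Int) :
    ((List.range (bal.findIdx (fun b => b < 0))).filter (fun j => bal.getD j 0 = 0)).foldl
        (fun (a : Int) (j : Nat) => max a (i + (j : Int) + 1)) ans = scanZeros bal i ans := by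
  induction bal generalizing i ans with
  | nil => simp [scanZeros]
  | cons h rest ih =>
    by_cases hneg : h < 0
    · simp [scanZeros, List.findIdx_cons, hneg]
    · have hfind : List.findIdx (fun b => decide (b < 0)) (h :: rest)
          = List.findIdx (fun b => decide (b < 0)) rest + 1 := by
        simp [List.findIdx_cons, hneg]
      rw [hfind, List.range_succ_eq_map, List.filter_cons, List.filter_map]
      have hcomp : ((fun j => decide ((h :: rest).getD j 0 = 0)) ∘ Nat.succ)
          = (fun j => decide (rest.getD j 0 = 0)) := by
        funext j; simp [Function.comp]
      rw [hcomp]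
      by_cases h0 : h = 0
      · rw [if_pos (by simp [h0]), List.foldl_cons, List.foldl_map]
        have funeq : (fun (a : Int) (j : Nat) => max a (i + (Nat.succ j : Int) + 1))
            = (fun (a : Int) (j : Nat) => max a ((i + 1) + (j : Int) + 1)) := by
          funext a j; push_cast; ring_nf
        rw [funeq, ih]
        simp [scanZeros, h0]
      · rw [if_neg (by simp [h0]), List.foldl_map]
        have funeq : (fun (a : Int) (j : Nat) => max a (i + (Nat.succ j : Int) + 1))
            = (fun (a : Int) (j : Nat) => max a ((i + 1) + (j : Int) + 1)) := by
          funext a j; push_cast; ring_nf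
        rw [funeq, ih]
        simp [scanZeros, hneg, h0]

-- ===== VERDICT (by name: the statement is the Claim_ definition above) =====
theorem compiler_spec : Claim_equal_compiler := by
  intro s _
  show compiler s = compiler_alt s
  unfold compiler compiler_alt
  rw [loopA_eq_scanZeros _ _ _ _ le_rfl, ← scanB_eq_scanZeros]
  congr 1
  funext a j; ring_nf
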